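-- pv_equiv track=rewrite | github.com/pfehlinger/risk_adjustment_model | src/risk_adjustment_model/category.py | _get_disease_categories
-- ===== SOURCE A (Python) =====
-- def _get_disease_categories(dx_categories):
--     """
--     """
--     cat_dict = {}
--     all_cats = [value for catlist in dx_categories.values() for value in catlist if value != 'NA']
--     unique_cats = set(all_cats)
--     for cat in unique_cats:
--         dx_codes = [key for key, value in dx_categories.items() if cat in value]
--         cat_dict[cat] = dx_codes
--
--     return cat_dict, unique_cats
-- ===== SOURCE B (Python) =====
-- def _get_disease_categories(dx_categories):
--     cat_dict = {}
--     for key, catlist in dx_categories.items():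
--         for cat in dict.fromkeys(catlist):
--             if cat != 'NA':
--                 cat_dict.setdefault(cat, []).append(key)
--     return cat_dict, set(cat_dict)
-- ===== Notes on version B (the rewrite author's own statement) =====
-- stated objective: faster
-- what changed: Single pass over the dict items appending each key under each of its (per-item deduplicated) categories, instead of one full scan of all items per distinct category.
import Mathlib
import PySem

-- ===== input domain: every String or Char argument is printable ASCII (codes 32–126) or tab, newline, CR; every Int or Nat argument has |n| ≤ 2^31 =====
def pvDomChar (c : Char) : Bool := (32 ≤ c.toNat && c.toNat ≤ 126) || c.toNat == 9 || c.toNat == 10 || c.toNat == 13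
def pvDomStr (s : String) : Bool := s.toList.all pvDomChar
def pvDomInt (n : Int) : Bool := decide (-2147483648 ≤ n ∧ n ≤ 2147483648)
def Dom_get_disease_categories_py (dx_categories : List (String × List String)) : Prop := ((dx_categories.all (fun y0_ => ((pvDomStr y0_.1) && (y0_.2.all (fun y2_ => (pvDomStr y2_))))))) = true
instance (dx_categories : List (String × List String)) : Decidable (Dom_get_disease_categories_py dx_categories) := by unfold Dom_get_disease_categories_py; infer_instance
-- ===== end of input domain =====

-- B inverts the dx→categories map in ONE pass over the items (appending each key under each
-- of its per-item-deduplicated non-'NA' categories) instead of rescanning all items once per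
-- distinct category; equivalence is about the return value (neither version mutates arguments).

-- ===== PORT A =====
def get_disease_categories_py (dx_categories : List (String × List String)) : (List (String × List String)) × List String :=
  -- all_cats = [value for catlist in dx_categories.values() for value in catlist if value != 'NA']
  let all_cats : List String :=
    (dx_categories.map (fun kv => kv.2)).flatMap (fun catlist => catlist.filter (fun v => v != "NA"))
  -- unique_cats = set(all_cats)
  let unique_cats : PySem.Set String := PySem.Set.ofList all_cats
  -- for cat in unique_cats: cat_dict[cat] = [key for key, value in dx_categories.items() if cat in value]
  let cat_dict : PySem.Dict String (List String) :=
    unique_cats.foldl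
      (fun d cat =>
        d.insert cat ((dx_categories.filter (fun kv => kv.2.contains cat)).map (fun kv => kv.1)))
      PySem.Dict.empty
  (cat_dict.items, unique_cats)

-- ===== PORT B =====
def get_disease_categories_py_alt (dx_categories : List (String × List String)) : (List (String × List String)) × List String :=
  -- for key, catlist in dx_categories.items():
  --   for cat in dict.fromkeys(catlist):
  --     if cat != 'NA': cat_dict.setdefault(cat, []).append(key)
  let cat_dict : PySem.Dict String (List String) :=
    dx_categories.foldl
      (fun d kv =>
        (PySem.List.dedup kv.2).foldl
          (fun d cat => if cat != "NA" then d.modify cat [] (fun l => l ++ [kv.1]) else d)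
          d)
      PySem.Dict.empty
  (cat_dict.items, PySem.Set.ofList cat_dict.keys)

-- ===== PRECONDITION & SPEC =====
def Spec_get_disease_categories_py (dx_categories : List (String × List String)) (out : (List (String × List String)) × List String) : Prop := out = get_disease_categories_py_alt dx_categories
instance (dx_categories : List (String × List String)) (out : (List (String × List String)) × List String) : Decidable (Spec_get_disease_categories_py dx_categories out) := by unfold Spec_get_disease_categories_py; infer_instance

-- ===== CLAIM (what is proved, stated in full; the proofs are below) =====
def Claim_equal_get_disease_categories_py : Prop := ∀ (dx_categories : List (String × List String)), Dom_get_disease_categories_py dx_categories → Spec_get_disease_categories_py dx_categories (get_disease_categories_py dx_categories)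

-- ===== LEMMAS AND PROOFS =====

-- the distinct non-'NA' categories in first-occurrence order (= unique_cats of port A)
def pvCats (dxs : List (String × List String)) : List String :=
  PySem.Set.ofList (dxs.flatMap (fun kv => kv.2.filter (fun v => v != "NA")))

-- the dx codes port A stores under category c
def pvCodes (dxs : List (String × List String)) (c : String) : List String :=
  (dxs.filter (fun kv => kv.2.contains c)).map (fun kv => kv.1)

-- B's nested loop, flattened to (category, key) pairs in traversal order
def pvPairs (dxs : List (String × List String)) : List (String × String) :=
  dxs.flatMap (fun kv => ((PySem.List.dedup kv.2).filter (fun c => c != "NA")).map (fun c => (c, kv.1)))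

theorem pv_inner_fold (l : List String) (k : String) (d : PySem.Dict String (List String)) :
    l.foldl (fun d cat => if cat != "NA" then d.modify cat [] (fun v => v ++ [k]) else d) d
      = ((l.filter (fun c => c != "NA")).map (fun c => (c, k))).foldl
          (fun d p => d.modify p.1 [] (fun v => v ++ [p.2])) d := by
  induction l generalizing d with
  | nil => rfl
  | cons x xs ih =>
    rw [List.foldl_cons, List.filter_cons]
    by_cases hx : (x != "NA") = true
    · rw [if_pos hx, if_pos hx, List.map_cons, List.foldl_cons, ih]
    · rw [if_neg hx, if_neg hx, ih]

theorem pv_bdict (dxs : List (String × List String)) (d : PySem.Dict String (List String)) :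
    dxs.foldl
      (fun d kv =>
        (PySem.List.dedup kv.2).foldl
          (fun d cat => if cat != "NA" then d.modify cat [] (fun l => l ++ [kv.1]) else d) d) d
      = (pvPairs dxs).foldl (fun d p => d.modify p.1 [] (fun v => v ++ [p.2])) d := by
  induction dxs generalizing d with
  | nil => rfl
  | cons kv rest ih =>
    rw [List.foldl_cons, pv_inner_fold (PySem.List.dedup kv.2) kv.1 d, ih]
    simp only [pvPairs, List.flatMap_cons, List.foldl_append]

theorem pv_filter_nodup (l : List String) (h : l.Nodup) (c : String) :
    l.filter (fun x => x == c) = if c ∈ l then [c] else [] := by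
  induction l with
  | nil => simp
  | cons x xs ih =>
    rcases List.nodup_cons.mp h with ⟨hx, hxs⟩
    rw [List.filter_cons]
    by_cases hc : x = c
    · have hxc : (x == c) = true := by simp [hc]
      have hnil : xs.filter (fun y => y == c) = [] :=
        List.filter_eq_nil_iff.mpr
          (fun a ha hb => hx (((beq_iff_eq.mp hb).trans hc.symm) ▸ ha))
      rw [if_pos hxc, hnil, if_pos (List.mem_cons.mpr (Or.inl hc.symm))]
      simp [hc]
    · have hne : (x == c) = false := by simp [hc]
      have hiff : c = x ∨ c ∈ xs ↔ c ∈ xs := or_iff_right (fun h' => hc h'.symm)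
      rw [hne]
      simp only [Bool.false_eq_true, if_false, ih hxs, List.mem_cons, hiff]

theorem pv_pairs_filter (dxs : List (String × List String)) (c : String) (hc : c ≠ "NA") :
    ((pvPairs dxs).filter (fun p => p.1 == c)).map (fun p => p.2) = pvCodes dxs c := by
  induction dxs with
  | nil => rfl
  | cons kv rest ih =>
    have hnodup : ((PySem.List.dedup kv.2).filter (fun c => c != "NA")).Nodup :=
      (PySem.List.nodup_dedup kv.2).filter _
    have hmem : c ∈ (PySem.List.dedup kv.2).filter (fun c => c != "NA") ↔ kv.2.contains c = true := by
      simp [List.mem_filter, hc]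
    have hchunk :
        ((((PySem.List.dedup kv.2).filter (fun c => c != "NA")).map (fun c => (c, kv.1))).filter
            (fun p => p.1 == c)).map (fun p => p.2)
          = if kv.2.contains c = true then [kv.1] else [] := by
      rw [List.filter_map, List.map_map]
      have : ((PySem.List.dedup kv.2).filter (fun c => c != "NA")).filter
          ((fun p => p.1 == c) ∘ fun c => (c, kv.1))
          = ((PySem.List.dedup kv.2).filter (fun c => c != "NA")).filter (fun x => x == c) := rfl
      rw [this, pv_filter_nodup _ hnodup c]
      by_cases hcon : kv.2.contains c = true
      · rw [if_pos (hmem.mpr hcon), if_pos hcon]; rfl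
      · rw [if_neg (fun hm => hcon (hmem.mp hm)), if_neg hcon]; rfl
    have hsplit : pvPairs (kv :: rest)
        = (((PySem.List.dedup kv.2).filter (fun c => c != "NA")).map (fun c => (c, kv.1)))
          ++ pvPairs rest := by
      simp [pvPairs, List.flatMap_cons]
    rw [hsplit, List.filter_append, List.map_append, hchunk, ih]
    unfold pvCodes
    rw [List.filter_cons]
    by_cases hcon : kv.2.contains c = true
    · rw [if_pos hcon, if_pos hcon, List.map_cons]
      rfl
    · rw [if_neg hcon, if_neg hcon, List.nil_append]

theorem pv_items_eq_keys_map (d : PySem.Dict String (List String)) (h : d.keys.Nodup) :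
    d.items = d.keys.map (fun k => (k, d.getD k [])) := by
  have h1 : d.keys.map (fun k => (k, d.getD k []))
      = d.items.map (fun p => (p.1, d.getD p.1 [])) := by
    simp only [PySem.Dict.keys, List.map_map]; rfl
  rw [h1]
  have h2 : ∀ p ∈ d.items, (p.1, d.getD p.1 []) = p := by
    intro p hp
    have := PySem.Dict.getD_of_mem_items d (k := p.1) (v := p.2) (by simpa using hp) h []
    rw [this]
  calc d.items = d.items.map id := (List.map_id d.items).symm
    _ = d.items.map (fun p => (p.1, d.getD p.1 [])) := (List.map_congr_left (by simpa using h2)).symm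

theorem pv_ofList_filter (l : List String) (p : String → Bool) :
    PySem.Set.ofList (l.filter p) = (PySem.Set.ofList l).filter p := by
  induction l using List.reverseRecOn with
  | nil => rfl
  | append_singleton xs x ih =>
    rw [List.filter_append, PySem.Set.ofList_append_singleton, PySem.Set.add_eq_ite]
    by_cases hp : p x = true
    · rw [List.filter_cons_of_pos hp, List.filter_nil, PySem.Set.ofList_append_singleton,
        PySem.Set.add_eq_ite, ih]
      by_cases hm : x ∈ PySem.Set.ofList xs
      · rw [if_pos hm, if_pos (by simp [List.mem_filter, hm, hp])]
      · rw [if_neg hm, if_neg (by simp [List.mem_filter, hm]), List.filter_append,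
          List.filter_cons_of_pos hp, List.filter_nil]
    · rw [List.filter_cons_of_neg (by simpa using hp), List.filter_nil, List.append_nil, ih]
      by_cases hm : x ∈ PySem.Set.ofList xs
      · rw [if_pos hm]
      · rw [if_neg hm, List.filter_append, List.filter_cons_of_neg (by simpa using hp),
          List.filter_nil, List.append_nil]

theorem pv_update_dedup_filter (l : List String) (p : String → Bool) (s : PySem.Set String) :
    PySem.Set.update s ((PySem.List.dedup l).filter p) = PySem.Set.update s (l.filter p) := by
  rw [PySem.Set.update_eq_append_filter, PySem.Set.update_eq_append_filter]
  have : PySem.Set.ofList ((PySem.List.dedup l).filter p) = PySem.Set.ofList (l.filter p) := by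
    rw [PySem.List.dedup_eq_ofList, ← pv_ofList_filter]
    exact PySem.Set.ofList_eq_self_of_nodup _ (PySem.Set.nodup_ofList (l.filter p))
  rw [this]

theorem pv_update_flatMap (dxs : List (String × List String)) (s : PySem.Set String) :
    PySem.Set.update s (dxs.flatMap (fun kv => (PySem.List.dedup kv.2).filter (fun c => c != "NA")))
      = PySem.Set.update s (dxs.flatMap (fun kv => kv.2.filter (fun c => c != "NA"))) := by
  induction dxs generalizing s with
  | nil => rfl
  | cons kv rest ih =>
    rw [List.flatMap_cons, List.flatMap_cons, PySem.Set.update_append, PySem.Set.update_append,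
      pv_update_dedup_filter, ih]

theorem pv_keysU (dxs : List (String × List String)) :
    PySem.Set.ofList ((pvPairs dxs).map (fun p => p.1)) = pvCats dxs := by
  have hmap : (pvPairs dxs).map (fun p => p.1)
      = dxs.flatMap (fun kv => (PySem.List.dedup kv.2).filter (fun c => c != "NA")) := by
    simp [pvPairs, List.map_flatMap, List.map_map, Function.comp_def]
  rw [hmap, pvCats, ← PySem.Set.update_nil_left, ← PySem.Set.update_nil_left,
    pv_update_flatMap]

theorem pv_mem_cats_ne_NA (dxs : List (String × List String)) (c : String)
    (hc : c ∈ pvCats dxs) : c ≠ "NA" := by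
  rw [pvCats, PySem.Set.mem_ofList] at hc
  rcases List.mem_flatMap.mp hc with ⟨kv, _, hcf⟩
  simpa using (List.mem_filter.mp hcf).2

-- ===== VERDICT (by name: the statement is the Claim_ definition above) =====
theorem get_disease_categories_py_spec : Claim_equal_get_disease_categories_py := by
  intro dxs _
  unfold Spec_get_disease_categories_py get_disease_categories_py get_disease_categories_py_alt
  simp only [List.flatMap_map]
  rw [pv_bdict]
  have hkeys : ((pvPairs dxs).foldl (fun d p => d.modify p.1 [] (fun v => v ++ [p.2]))
      PySem.Dict.empty).keys = pvCats dxs := by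
    rw [PySem.Dict.keys_foldl_modify_key (pvPairs dxs) (fun p => p.1) []
      (fun _ p => fun v => v ++ [p.2]) PySem.Dict.empty, PySem.Dict.keys_empty,
      PySem.Set.update_nil_left, pv_keysU]
  have hU : PySem.Set.ofList
      (dxs.flatMap (fun kv => kv.2.filter (fun v => v != "NA"))) = pvCats dxs := rfl
  have hUnodup : (pvCats dxs).Nodup := PySem.Set.nodup_ofList _
  have hAitems : ((pvCats dxs).foldl
      (fun d cat => d.insert cat ((dxs.filter (fun kv => kv.2.contains cat)).map (fun kv => kv.1)))
      PySem.Dict.empty).items = (pvCats dxs).map (fun c => (c, pvCodes dxs c)) := by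
    have := PySem.Dict.items_foldl_insert_fresh (pvCats dxs) (fun c => c)
      (fun c => pvCodes dxs c) PySem.Dict.empty
      (fun a _ => PySem.Dict.contains_empty a) (by simpa using hUnodup)
    simpa [pvCodes] using this
  have hBitems : ((pvPairs dxs).foldl (fun d p => d.modify p.1 [] (fun v => v ++ [p.2]))
      PySem.Dict.empty).items = (pvCats dxs).map (fun c => (c, pvCodes dxs c)) := by
    rw [pv_items_eq_keys_map _ (hkeys ▸ hUnodup), hkeys]
    refine List.map_congr_left (fun c hcU => ?_)
    rw [PySem.Dict.getD_foldl_modify_append, PySem.Dict.getD_empty, List.nil_append,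
      pv_pairs_filter dxs c (pv_mem_cats_ne_NA dxs c hcU)]
  rw [hU, hAitems, hBitems, hkeys, PySem.Set.ofList_eq_self_of_nodup _ hUnodup]
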